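-- pv_equiv track=rewrite | github.com/lhy-hoyin/SleepOnCall | helper.py | time_in_seconds
-- ===== SOURCE A (Python) =====
-- import math
--
-- def time_in_seconds(input: tuple | list) -> int:
--     seconds = 0
--     factor = (1, 60, 60, 24, 7, 52) # Supports up to a year
--
--     while len(input) > 0:
--         input = [math.prod(x) for x in zip(input, factor)]
--         seconds += input[0]
--         input = input[1:]
--
--     return seconds
-- ===== SOURCE B (Python) =====
-- def time_in_seconds(input) -> int:
--     seconds = 0
--     mult = 1
--     for x, f in zip(input, (1, 60, 60, 24, 7, 52)):
--         mult *= f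
--         seconds += x * mult
--     return seconds
-- ===== Notes on version B (the rewrite author's own statement) =====
-- stated objective: simpler
-- what changed: Replaces A's while-loop that rebuilds the whole zipped-product list and re-slices it every pass with a single pass keeping a running multiplier (mult *= f; seconds += x * mult).
import Mathlib
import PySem

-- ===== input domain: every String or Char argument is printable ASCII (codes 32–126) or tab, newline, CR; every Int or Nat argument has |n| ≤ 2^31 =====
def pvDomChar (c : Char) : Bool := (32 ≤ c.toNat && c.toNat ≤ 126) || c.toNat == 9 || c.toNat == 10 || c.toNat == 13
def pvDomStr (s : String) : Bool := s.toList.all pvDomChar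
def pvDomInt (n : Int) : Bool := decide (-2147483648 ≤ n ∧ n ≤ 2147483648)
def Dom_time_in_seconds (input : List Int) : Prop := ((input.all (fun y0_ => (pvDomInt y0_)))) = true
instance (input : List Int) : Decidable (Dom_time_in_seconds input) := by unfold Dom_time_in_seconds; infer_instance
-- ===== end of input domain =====

-- B replaces A's repeated rebuild-and-slice of the zipped product list with one pass
-- carrying a running multiplier; objective: simpler.

-- ===== PORT A =====
-- factor = (1, 60, 60, 24, 7, 52)
def pyFactor : List Int := [1, 60, 60, 24, 7, 52]

-- the while-loop of A: state = (input, seconds)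
def time_in_seconds_go (input : List Int) (seconds : Int) : Int :=
  if _h : input.length > 0 then
    -- input = [math.prod(x) for x in zip(input, factor)]
    let input' := (input.zip pyFactor).map (fun p => p.1 * p.2)
    -- seconds += input[0]; input = input[1:]
    time_in_seconds_go input'.tail (seconds + input'.headI)
  else seconds
termination_by input.length
decreasing_by
  simp [List.length_zip, pyFactor]
  omega

def time_in_seconds (input : List Int) : Int := time_in_seconds_go input 0

-- ===== PORT B =====
def time_in_seconds_alt (input : List Int) : Int :=
  ((input.zip [1, 60, 60, 24, 7, 52]).foldl
    (fun (st : Int × Int) xf => (st.1 + xf.1 * (st.2 * xf.2), st.2 * xf.2)) (0, 1)).1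

-- ===== PRECONDITION & SPEC =====
def Spec_time_in_seconds (input : List Int) (out : Int) : Prop := out = time_in_seconds_alt input
instance (input : List Int) (out : Int) : Decidable (Spec_time_in_seconds input out) := by unfold Spec_time_in_seconds; infer_instance

-- ===== CLAIM (what is proved, stated in full; the proofs are below) =====
def Claim_equal_time_in_seconds : Prop := ∀ (input : List Int), Dom_time_in_seconds input → Spec_time_in_seconds input (time_in_seconds input)

-- ===== LEMMAS AND PROOFS =====

-- ===== VERDICT (by name: the statement is the Claim_ definition above) =====
theorem time_in_seconds_spec : Claim_equal_time_in_seconds := by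
  intro input _
  unfold Spec_time_in_seconds
  rcases input with _ | ⟨a, _ | ⟨b, _ | ⟨c, _ | ⟨d, _ | ⟨e, _ | ⟨f, rest⟩⟩⟩⟩⟩⟩ <;>
    simp [time_in_seconds, time_in_seconds_alt, time_in_seconds_go, pyFactor, List.zip] <;> ring
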